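-- pv_equiv track=rewrite | github.com/Youhorng/G10-IoT-Class-Activity | lab2-webserver-lcd-control/main.py | get_query_value
-- ===== SOURCE A (Python) =====
-- def get_query_value(path, key):
--     if "?" not in path:
--         return ""
--     qs = path.split("?", 1)[1]
--     for kv in qs.split("&"):
--         if "=" in kv:
--             k, v = kv.split("=", 1)
--             if k == key:
--                 return v
--     return ""
-- ===== SOURCE B (Python) =====
-- def get_query_value(path, key):
--     if "?" not in path:
--         return ""
--     # a parameter name can never contain '&' or '=', so such a key never matches
--     if "&" in key or "=" in key:
--         return ""
--     hay = "&" + path.split("?", 1)[1]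
--     needle = "&" + key + "="
--     i = hay.find(needle)
--     if i == -1:
--         return ""
--     start = i + len(needle)
--     end = hay.find("&", start)
--     return hay[start:end] if end != -1 else hay[start:]
-- ===== Notes on version B (the rewrite author's own statement) =====
-- stated objective: alternative
-- what changed: B does not split the query string into '&'-separated pairs at all: it searches once for the anchored substring '&'+key+'=' in '&'+qs (after rejecting keys containing '&' or '=', which can never name a parameter) and slices the value out up to the next '&', replacing A's split-and-scan over all pairs.
import Mathlib
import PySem

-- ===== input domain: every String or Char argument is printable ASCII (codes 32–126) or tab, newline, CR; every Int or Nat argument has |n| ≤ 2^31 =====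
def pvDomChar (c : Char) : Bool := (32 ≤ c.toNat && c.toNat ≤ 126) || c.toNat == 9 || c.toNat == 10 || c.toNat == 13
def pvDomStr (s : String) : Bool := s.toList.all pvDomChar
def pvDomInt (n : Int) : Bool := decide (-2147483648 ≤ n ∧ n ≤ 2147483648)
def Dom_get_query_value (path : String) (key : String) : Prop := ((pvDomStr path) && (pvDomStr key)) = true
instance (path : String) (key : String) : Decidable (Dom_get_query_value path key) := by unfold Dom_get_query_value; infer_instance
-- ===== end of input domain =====

-- B replaces A's split-into-'&'-pairs-and-scan by one anchored substring search for "&key=" plus a slice up to the next '&' (alternative algorithm, same cost).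

-- ===== PORT A =====
-- the for-loop over the '&'-split pieces, with early return, as structural recursion
def pvGoA (key : String) : List String → String
  | [] => ""
  | kv :: rest =>
    if PySem.Str.isIn "=" kv then
      -- k, v = kv.split("=", 1) : sep "=" is nonempty so splitMax? is never none
      if ((PySem.Str.splitMax? kv "=" 1).getD []).getD 0 "" = key then
        ((PySem.Str.splitMax? kv "=" 1).getD []).getD 1 ""
      else pvGoA key rest
    else pvGoA key rest

def get_query_value (path : String) (key : String) : String :=
  if PySem.Str.isIn "?" path then
    -- path.split("?", 1)[1]: index 1 always exists here since "?" ∈ path, so getD is exact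
    let qs := ((PySem.Str.splitMax? path "?" 1).getD []).getD 1 ""
    pvGoA key ((PySem.Str.split? qs "&").getD [])   -- sep "&" ≠ "" so split? is never none
  else ""

-- ===== PORT B =====
def get_query_value_alt (path : String) (key : String) : String :=
  if PySem.Str.isIn "?" path then
    -- a parameter name can never contain '&' or '=', so such a key never matches
    if PySem.Str.isIn "&" key || PySem.Str.isIn "=" key then ""
    else
      let hay := "&" ++ ((PySem.Str.splitMax? path "?" 1).getD []).getD 1 ""
      let needle := "&" ++ key ++ "="
      let i := PySem.Str.find hay needle
      if i = -1 then ""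
      else
        let start := i + PySem.Str.len needle
        let e := PySem.Str.findFrom hay "&" start
        if e = -1 then PySem.Str.slice hay (some start) none
        else PySem.Str.slice hay (some start) (some e)
  else ""

-- ===== PRECONDITION & SPEC =====
def Spec_get_query_value (path : String) (key : String) (out : String) : Prop := out = get_query_value_alt path key
instance (path : String) (key : String) (out : String) : Decidable (Spec_get_query_value path key out) := by unfold Spec_get_query_value; infer_instance

-- ===== CLAIM (what is proved, stated in full; the proofs are below) =====
def Claim_equal_get_query_value : Prop := ∀ (path : String) (key : String), Dom_get_query_value path key → Spec_get_query_value path key (get_query_value path key)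

-- ===== LEMMAS AND PROOFS =====
theorem pv_go_acc (sep : List Char) (fuel : Nat) (s cur : List Char) (acc : List (List Char)) :
    PySem.Chars.splitOn.go sep fuel s cur acc = acc.reverse ++ PySem.Chars.splitOn.go sep fuel s cur [] := by
  induction fuel generalizing s cur acc with
  | zero => rw [PySem.Chars.splitOn.go.eq_def, PySem.Chars.splitOn.go.eq_def]; simp
  | succ fuel ih =>
    cases s with
    | nil => rw [PySem.Chars.splitOn.go.eq_def, PySem.Chars.splitOn.go.eq_def]; simp
    | cons c rest =>
      rw [PySem.Chars.splitOn.go.eq_def]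
      conv_rhs => rw [PySem.Chars.splitOn.go.eq_def]
      by_cases h : sep.isPrefixOf (c :: rest) = true
      · simp only [h, if_true]
        rw [ih _ _ (cur.reverse :: acc), ih _ _ [cur.reverse]]
        simp
      · simp only [h, Bool.false_eq_true, if_false]
        rw [ih _ _ acc]

theorem pv_go_fuel (fuel fuel' : Nat) (s cur : List Char) (acc : List (List Char))
    (h : s.length ≤ fuel) (h' : s.length ≤ fuel') :
    PySem.Chars.splitOn.go ['&'] fuel s cur acc = PySem.Chars.splitOn.go ['&'] fuel' s cur acc := by
  induction s generalizing fuel fuel' cur acc with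
  | nil =>
    rw [PySem.Chars.splitOn.go.eq_def, PySem.Chars.splitOn.go.eq_def]
    cases fuel <;> cases fuel' <;> simp
  | cons c rest ih =>
    simp only [List.length_cons] at h h'
    obtain ⟨f, rfl⟩ : ∃ f, fuel = f + 1 := ⟨fuel - 1, by omega⟩
    obtain ⟨f', rfl⟩ : ∃ f', fuel' = f' + 1 := ⟨fuel' - 1, by omega⟩
    rw [PySem.Chars.splitOn.go.eq_def]
    conv_rhs => rw [PySem.Chars.splitOn.go.eq_def]
    by_cases h1 : List.isPrefixOf ['&'] (c :: rest) = true
    · simp only [h1, if_true, List.length_cons, List.drop_succ_cons]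
      exact ih _ _ _ _ (by omega) (by omega)
    · simp only [h1, Bool.false_eq_true, if_false]
      exact ih _ _ _ _ (by omega) (by omega)

theorem pv_go_free (s cur : List Char) (acc : List (List Char)) (fuel : Nat)
    (hfree : '&' ∉ s) (hf : s.length ≤ fuel) :
    PySem.Chars.splitOn.go ['&'] fuel s cur acc = acc.reverse ++ [cur.reverse ++ s] := by
  induction s generalizing fuel cur with
  | nil =>
    rw [PySem.Chars.splitOn.go.eq_def]; cases fuel <;> simp
  | cons c rest ih =>
    simp only [List.length_cons] at hf
    obtain ⟨f, rfl⟩ : ∃ f, fuel = f + 1 := ⟨fuel - 1, by omega⟩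
    rw [PySem.Chars.splitOn.go.eq_def]
    have hc : c ≠ '&' := fun h => hfree (h ▸ List.mem_cons_self ..)
    have h1 : List.isPrefixOf ['&'] (c :: rest) = false := by
      simp [List.isPrefixOf]; exact fun h => absurd h.symm hc
    simp only [h1, Bool.false_eq_true, if_false]
    rw [ih _ _ (fun h => hfree (List.mem_cons_of_mem _ h)) (by omega)]
    simp

theorem pv_go_break (kv rest cur : List Char) (acc : List (List Char)) (fuel : Nat)
    (hfree : '&' ∉ kv) (hf : kv.length + rest.length + 1 ≤ fuel) :
    PySem.Chars.splitOn.go ['&'] fuel (kv ++ '&' :: rest) cur acc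
      = PySem.Chars.splitOn.go ['&'] rest.length rest [] ((cur.reverse ++ kv) :: acc) := by
  induction kv generalizing fuel cur with
  | nil =>
    obtain ⟨f, rfl⟩ : ∃ f, fuel = f + 1 := ⟨fuel - 1, by omega⟩
    rw [PySem.Chars.splitOn.go.eq_def]
    simp only [List.nil_append, List.isPrefixOf, beq_self_eq_true, Bool.and_true,
      if_true, List.length_cons, List.length_nil, List.drop_succ_cons, List.drop_zero,
      List.append_nil]
    exact pv_go_fuel _ _ _ _ _ (by omega) (by omega)
  | cons c t ih =>
    simp only [List.length_cons] at hf
    obtain ⟨f, rfl⟩ : ∃ f, fuel = f + 1 := ⟨fuel - 1, by omega⟩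
    rw [PySem.Chars.splitOn.go.eq_def]
    have hc : c ≠ '&' := fun h => hfree (h ▸ List.mem_cons_self ..)
    have h1 : List.isPrefixOf ['&'] (c :: (t ++ '&' :: rest)) = false := by
      simp [List.isPrefixOf]; exact fun h => absurd h.symm hc
    simp only [List.cons_append, h1, Bool.false_eq_true, if_false]
    rw [ih _ _ (fun h => hfree (List.mem_cons_of_mem _ h)) (by omega)]
    simp

theorem pv_splitOn_free (s : List Char) (hfree : '&' ∉ s) :
    PySem.Chars.splitOn s ['&'] = [s] := by
  show PySem.Chars.splitOn.go ['&'] (s.length + 1) s [] [] = [s]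
  rw [pv_go_free _ _ _ _ hfree (by omega)]; simp

theorem pv_splitOn_cons (kv rest : List Char) (hfree : '&' ∉ kv) :
    PySem.Chars.splitOn (kv ++ '&' :: rest) ['&'] = kv :: PySem.Chars.splitOn rest ['&'] := by
  show PySem.Chars.splitOn.go ['&'] ((kv ++ '&' :: rest).length + 1) (kv ++ '&' :: rest) [] [] = _
  rw [pv_go_break _ _ _ _ _ hfree (by simp), pv_go_acc]
  rw [pv_go_fuel rest.length (rest.length + 1) rest [] [] (by omega) (by omega)]
  simp [PySem.Chars.splitOn]

theorem pv_goM_zero (fuel : Nat) (s : List Char) (acc : List (List Char)) :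
    PySem.Chars.splitOnMax.go ['='] fuel 0 s [] acc = acc.reverse ++ [s] := by
  rw [PySem.Chars.splitOnMax.go.eq_def]
  cases fuel <;> cases s <;> simp

theorem pv_goM_break (k v cur : List Char) (acc : List (List Char)) (fuel : Nat)
    (hfree : '=' ∉ k) (hf : k.length + v.length + 1 ≤ fuel) :
    PySem.Chars.splitOnMax.go ['='] fuel 1 (k ++ '=' :: v) cur acc
      = acc.reverse ++ [cur.reverse ++ k, v] := by
  induction k generalizing fuel cur with
  | nil =>
    obtain ⟨f, rfl⟩ : ∃ f, fuel = f + 1 := ⟨fuel - 1, by omega⟩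
    rw [PySem.Chars.splitOnMax.go.eq_def]
    simp only [List.nil_append, List.isPrefixOf, beq_self_eq_true, Bool.and_true, if_true,
      List.length_cons, List.length_nil, List.drop_succ_cons, List.drop_zero,
    ]
    rw [show (1 : Nat) - 1 = 0 from rfl, pv_goM_zero]
    simp
  | cons c t ih =>
    simp only [List.length_cons] at hf
    obtain ⟨f, rfl⟩ : ∃ f, fuel = f + 1 := ⟨fuel - 1, by omega⟩
    rw [PySem.Chars.splitOnMax.go.eq_def]
    have hc : c ≠ '=' := fun h => hfree (h ▸ List.mem_cons_self ..)
    have h1 : List.isPrefixOf ['='] (c :: (t ++ '=' :: v)) = false := by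
      simp [List.isPrefixOf]; exact fun h => absurd h.symm hc
    simp only [List.cons_append, h1, Bool.false_eq_true, if_false]
    rw [ih _ _ (fun h => hfree (List.mem_cons_of_mem _ h)) (by omega)]
    simp

theorem pv_splitOnMax_break (k v : List Char) (hfree : '=' ∉ k) :
    PySem.Chars.splitOnMax (k ++ '=' :: v) ['='] 1 = [k, v] := by
  show (if (1:Int) < 0 then _ else PySem.Chars.splitOnMax.go ['='] ((k ++ '=' :: v).length + 1) (1:Int).toNat _ [] []) = _
  rw [if_neg (by norm_num)]
  rw [show ((1:Int).toNat) = 1 from rfl, pv_goM_break _ _ _ _ _ hfree (by simp)]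
  simp

theorem pv_fgo_add (sub : List Char) (hsub : sub ≠ []) (s : List Char) (k : Nat) :
    PySem.Chars.find.go sub s k
      = if PySem.Chars.find.go sub s 0 = -1 then -1 else PySem.Chars.find.go sub s 0 + k := by
  induction s generalizing k with
  | nil =>
    rw [PySem.Chars.find.go.eq_def]
    conv_rhs => rw [PySem.Chars.find.go.eq_def]
    simp [hsub]
  | cons c t ih =>
    rw [PySem.Chars.find.go.eq_def]
    conv_rhs => rw [PySem.Chars.find.go.eq_def]
    by_cases h : sub.isPrefixOf (c :: t) = true
    · simp [h]
    · simp only [h, Bool.false_eq_true, if_false]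
      rw [ih (k + 1), ih 1]
      have h3 : -1 ≤ PySem.Chars.find.go sub t 0 := PySem.Chars.neg_one_le_find t sub
      by_cases h2 : PySem.Chars.find.go sub t 0 = -1
      · simp [h2]
      · rw [if_neg h2, if_neg (by omega), if_neg (by omega)]
        push_cast; ring

theorem pv_find_cons (sub : List Char) (hsub : sub ≠ []) (c : Char) (t : List Char) :
    PySem.Chars.find (c :: t) sub
      = if sub.isPrefixOf (c :: t) then 0
        else if PySem.Chars.find t sub = -1 then -1 else PySem.Chars.find t sub + 1 := by
  show PySem.Chars.find.go sub (c :: t) 0 = _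
  rw [PySem.Chars.find.go.eq_def]
  by_cases h : sub.isPrefixOf (c :: t) = true
  · simp [h]
  · simp only [h, Bool.false_eq_true, if_false]
    rw [pv_fgo_add sub hsub t 1]
    rfl

theorem pv_find_none_of_free (a : List Char) (c : Char) (hfree : c ∉ a) :
    PySem.Chars.find a [c] = -1 := by
  rw [PySem.Chars.find_eq_neg_one_iff]
  rw [List.singleton_infix_iff]
  exact hfree

theorem pv_find_amp_boundary (a r : List Char) (c : Char) (hfree : c ∉ a) :
    PySem.Chars.find (a ++ c :: r) [c] = a.length := by
  induction a with
  | nil =>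
    rw [List.nil_append, pv_find_cons [c] (by simp) c r]
    simp [List.isPrefixOf]
  | cons x t ih =>
    have hx : x ≠ c := fun h => hfree (h ▸ List.mem_cons_self ..)
    rw [List.cons_append, pv_find_cons [c] (by simp) x _]
    have h1 : List.isPrefixOf [c] (x :: (t ++ c :: r)) = false := by
      simp [List.isPrefixOf]; exact fun h => absurd h.symm hx
    rw [h1, ih (fun h => hfree (List.mem_cons_of_mem _ h))]
    simp only [Bool.false_eq_true, if_false]
    rw [if_neg (by omega)]
    simp only [List.length_cons]
    push_cast; ring

-- no match starting anywhere in the a-part ⇒ find shifts past a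
theorem pv_find_prefix_free (sub a b : List Char) (hsub : sub ≠ [])
    (h : ∀ i, i < a.length → ¬ sub <+: (a ++ b).drop i) :
    PySem.Chars.find (a ++ b) sub
      = if PySem.Chars.find b sub = -1 then -1 else a.length + PySem.Chars.find b sub := by
  induction a with
  | nil =>
    simp only [List.nil_append, List.length_nil, Nat.cast_zero, zero_add]
    split <;> simp_all
  | cons x t ih =>
    rw [List.cons_append, pv_find_cons sub hsub x _]
    have h0 : ¬ sub <+: (x :: (t ++ b)) := by
      have := h 0 (by simp)
      simpa using this
    rw [if_neg (by simpa [List.isPrefixOf_iff_prefix] using h0)]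
    rw [ih (fun i hi => by simpa [List.drop_succ_cons] using h (i+1) (by simp; omega))]
    by_cases h2 : PySem.Chars.find b sub = -1
    · simp [h2]
    · have h3 : -1 ≤ PySem.Chars.find b sub := PySem.Chars.neg_one_le_find b sub
      rw [if_neg h2, if_neg h2, if_neg (by omega)]
      simp only [List.length_cons]; push_cast; ring

-- p avoids c and is a prefix of a ++ c :: b ⇒ p is a prefix of a
theorem pv_prefix_avoid {p a b : List Char} {c : Char} (h : p <+: a ++ c :: b) (hc : c ∉ p) :
    p <+: a := by
  by_cases hl : p.length ≤ a.length
  · rw [List.prefix_iff_eq_take] at h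
    rw [h, List.take_append_of_le_length hl]
    exact List.take_prefix _ _
  · exfalso
    apply hc
    have hi : a.length < p.length := by omega
    have h2 := List.IsPrefix.getElem h hi
    simp at h2
    exact h2 ▸ List.getElem_mem _
-- first occurrence decomposition
theorem pv_split_first {l : List Char} {c : Char} (h : c ∈ l) :
    ∃ k v, l = k ++ c :: v ∧ c ∉ k := by
  induction l with
  | nil => cases h
  | cons x t ih =>
    by_cases hx : x = c
    · exact ⟨[], t, by simp [hx], by simp⟩
    · have : c ∈ t := by cases h with
        | head => exact absurd rfl hx
        | tail _ h => exact h
      obtain ⟨k, v, rfl, hk⟩ := ih this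
      exact ⟨x :: k, v, by simp, by simp [hk]; exact fun h' => hx h'.symm⟩

theorem pv_isIn_mem (c : Char) (s : List Char) : PySem.Chars.isIn [c] s = true ↔ c ∈ s := by
  rw [PySem.Chars.isIn_iff_infix, List.singleton_infix_iff]

-- char-level mirror of pvGoA
def pvCharGoA (key : List Char) : List (List Char) → List Char
  | [] => []
  | kv :: rest =>
    if PySem.Chars.isIn ['='] kv then
      if (PySem.Chars.splitOnMax kv ['='] 1).getD 0 [] = key then
        (PySem.Chars.splitOnMax kv ['='] 1).getD 1 []
      else pvCharGoA key rest
    else pvCharGoA key rest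

-- char-level mirror of B's search-and-slice core
def pvCoreB (qs key : List Char) : List Char :=
  let hay := '&' :: qs
  let needle := '&' :: (key ++ ['='])
  let i := PySem.Chars.find hay needle
  if i = -1 then []
  else
    let start := i + (needle.length : Int)
    let e := PySem.Chars.findFrom hay ['&'] start
    if e = -1 then PySem.List.slice hay (some start) none
    else PySem.List.slice hay (some start) (some e)

theorem pv_prefix_getElem? {p l : List Char} (h : p <+: l) (i : Nat) :
    i < p.length → l[i]? = p[i]? := fun hi => by
  obtain ⟨t, rfl⟩ := h
  rw [List.getElem?_append_left hi]

-- A's per-pair test is exactly "kv starts with key=", when key contains no '='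
theorem pv_stepA (key kv : List Char) (l : List (List Char)) (hke : '=' ∉ key) :
    pvCharGoA key (kv :: l)
      = if key ++ ['='] <+: kv then kv.drop (key.length + 1) else pvCharGoA key l := by
  by_cases hm : '=' ∈ kv
  · obtain ⟨k, v, rfl, hk⟩ := pv_split_first hm
    rw [show pvCharGoA key ((k ++ '=' :: v) :: l)
        = (if PySem.Chars.isIn ['='] (k ++ '=' :: v) then
            (if (PySem.Chars.splitOnMax (k ++ '=' :: v) ['='] 1).getD 0 [] = key then
              (PySem.Chars.splitOnMax (k ++ '=' :: v) ['='] 1).getD 1 []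
            else pvCharGoA key l)
          else pvCharGoA key l) from rfl]
    rw [if_pos ((pv_isIn_mem _ _).mpr hm), pv_splitOnMax_break k v hk]
    simp only [List.getD_cons_zero, List.getD_cons_succ]
    by_cases hkey : k = key
    · subst hkey
      rw [if_pos rfl, if_pos ⟨v, by simp⟩]
      rw [show k.length + 1 = (k ++ ['=']).length from by simp,
        show k ++ '=' :: v = (k ++ ['=']) ++ v from by simp, List.drop_left]
    · rw [if_neg hkey, if_neg]
      intro hpre
      apply hkey
      -- key ++ ['='] <+: k ++ '=' :: v with '=' ∉ key, '=' ∉ k forces k = key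
      have hlen : key.length = k.length := by
        by_cases hlt : key.length < k.length
        · exfalso
          have h2 := pv_prefix_getElem? hpre key.length (by simp)
          rw [List.getElem?_append_left hlt] at h2
          have h3 : (key ++ ['='])[key.length]? = some '=' := by simp
          rw [h3] at h2
          exact hk (List.mem_of_getElem? h2)
        · by_cases hgt : k.length < key.length
          · exfalso
            have h2 := pv_prefix_getElem? hpre k.length (by simp; omega)
            have h4 : (k ++ '=' :: v)[k.length]? = some '=' := by simp
            have h5 : (key ++ ['='])[k.length]? = key[k.length]? :=
              List.getElem?_append_left hgt
            rw [h4, h5] at h2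
            exact hke (List.mem_of_getElem? h2.symm)
          · omega
      -- equal lengths: both are the take of the same list
      rw [List.prefix_iff_eq_take] at hpre
      have hkeyeq : key = List.take key.length (k ++ '=' :: v) := by
        have h6 := congrArg (List.take key.length) hpre
        rw [List.take_take] at h6
        simpa [List.take_append_of_le_length (by simp : key.length ≤ (key ++ ['=']).length)]
          using h6
      rw [hkeyeq, hlen, List.take_append_of_le_length (le_refl _), List.take_length]
  · rw [show pvCharGoA key (kv :: l)
        = (if PySem.Chars.isIn ['='] kv then
            (if (PySem.Chars.splitOnMax kv ['='] 1).getD 0 [] = key then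
              (PySem.Chars.splitOnMax kv ['='] 1).getD 1 []
            else pvCharGoA key l)
          else pvCharGoA key l) from rfl]
    rw [if_neg (by rw [pv_isIn_mem]; exact hm), if_neg]
    intro hpre
    exact hm (hpre.subset (by simp))

theorem pv_needle_nonempty (key : List Char) : ('&' :: (key ++ ['='])) ≠ [] := by simp

theorem pv_coreB_last (key kv : List Char) (hfree : '&' ∉ kv) :
    pvCoreB kv key = if key ++ ['='] <+: kv then kv.drop (key.length + 1) else [] := by
  by_cases hp : key ++ ['='] <+: kv
  · obtain ⟨v, hv⟩ := hp
    have hvfree : '&' ∉ v := fun h => hfree (hv ▸ List.mem_append_right _ h)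
    have hdrop : kv.drop (key.length + 1) = v := by
      rw [← hv, show key.length + 1 = (key ++ ['=']).length from by simp, List.drop_left]
    rw [if_pos ⟨v, hv⟩, hdrop]
    show (if PySem.Chars.find ('&' :: kv) ('&' :: (key ++ ['='])) = -1 then _ else _) = v
    have hpre : List.isPrefixOf ('&' :: (key ++ ['='])) ('&' :: kv) = true := by
      rw [List.isPrefixOf_iff_prefix]
      exact List.cons_prefix_cons.mpr ⟨rfl, ⟨v, hv⟩⟩
    rw [pv_find_cons _ (pv_needle_nonempty key) _ _, if_pos hpre]
    rw [if_neg (by norm_num)]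
    have hlen : ('&' :: (key ++ ['='])).length = key.length + 2 := by simp
    have hstart : (0 : Int) + (('&' :: (key ++ ['='])).length : Int)
        = ((key.length + 2 : Nat) : Int) := by rw [hlen]; push_cast; ring
    rw [hstart]
    have hhay : ('&' :: kv) = ('&' :: (key ++ ['='])) ++ v := by simp [← hv]
    have hle : key.length + 2 ≤ ('&' :: kv).length := by
      rw [hhay]; simp
    rw [PySem.Chars.findFrom_natCast _ _ _ hle]
    have hdrop2 : List.drop (key.length + 2) ('&' :: kv) = v := by
      rw [hhay, show key.length + 2 = ('&' :: (key ++ ['='])).length from hlen.symm,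
        List.drop_left]
    rw [hdrop2, pv_find_none_of_free v '&' hvfree, if_pos rfl, if_pos rfl]
    rw [PySem.List.slice_from _ (by positivity)]
    rw [Int.toNat_natCast]
    exact hdrop2
  · rw [if_neg hp]
    show (if PySem.Chars.find ('&' :: kv) ('&' :: (key ++ ['='])) = -1 then _ else _) = _
    have hfind : PySem.Chars.find ('&' :: kv) ('&' :: (key ++ ['='])) = -1 := by
      rw [PySem.Chars.find_eq_neg_one_iff]
      intro hinf
      obtain ⟨j, hj⟩ := (PySem.Chars.exists_prefix_drop_iff_isIn _ _).mpr
        ((PySem.Chars.isIn_iff_infix _ _).mpr hinf)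
      cases j with
      | zero =>
        simp only [List.drop_zero] at hj
        exact hp (List.cons_prefix_cons.mp hj).2
      | succ j =>
        rw [List.drop_succ_cons] at hj
        have : '&' ∈ kv.drop j := hj.subset (List.mem_cons_self ..)
        exact hfree (List.mem_of_mem_drop this)
    rw [hfind, if_pos rfl]

theorem pv_coreB_step (key kv rest : List Char) (hfree : '&' ∉ kv) (hka : '&' ∉ key) :
    pvCoreB (kv ++ '&' :: rest) key
      = if key ++ ['='] <+: kv then kv.drop (key.length + 1) else pvCoreB rest key := by
  by_cases hp : key ++ ['='] <+: kv
  · obtain ⟨v, hv⟩ := hp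
    have hvfree : '&' ∉ v := fun h => hfree (hv ▸ List.mem_append_right _ h)
    have hdrop : kv.drop (key.length + 1) = v := by
      rw [← hv, show key.length + 1 = (key ++ ['=']).length from by simp, List.drop_left]
    rw [if_pos ⟨v, hv⟩, hdrop]
    show (if PySem.Chars.find ('&' :: (kv ++ '&' :: rest)) ('&' :: (key ++ ['='])) = -1
          then _ else _) = v
    have hpre : List.isPrefixOf ('&' :: (key ++ ['='])) ('&' :: (kv ++ '&' :: rest)) = true := by
      rw [List.isPrefixOf_iff_prefix]
      exact List.cons_prefix_cons.mpr ⟨rfl, ⟨v ++ '&' :: rest, by rw [← hv]; simp⟩⟩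
    rw [pv_find_cons _ (pv_needle_nonempty key) _ _, if_pos hpre, if_neg (by norm_num)]
    have hlen : ('&' :: (key ++ ['='])).length = key.length + 2 := by simp
    rw [show (0 : Int) + (('&' :: (key ++ ['='])).length : Int) = ((key.length + 2 : Nat) : Int)
        from by rw [hlen]; ring]
    have hhay : ('&' :: (kv ++ '&' :: rest)) = ('&' :: (key ++ ['='])) ++ (v ++ '&' :: rest) := by
      simp [← hv]
    have hle : key.length + 2 ≤ ('&' :: (kv ++ '&' :: rest)).length := by
      rw [hhay]; simp
    rw [PySem.Chars.findFrom_natCast _ _ _ hle]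
    have hdrop2 : List.drop (key.length + 2) ('&' :: (kv ++ '&' :: rest)) = v ++ '&' :: rest := by
      rw [hhay, show key.length + 2 = ('&' :: (key ++ ['='])).length from hlen.symm, List.drop_left]
    rw [hdrop2, pv_find_amp_boundary v rest '&' hvfree]
    have hv1 : ((v.length : Nat) : Int) ≠ -1 := by omega
    have hv2 : (((key.length + 2 : Nat) : Nat) : Int) + ((v.length : Nat) : Int) ≠ -1 := by
      push_cast; omega
    rw [if_neg hv1, if_neg hv2]
    rw [show ((key.length + 2 : Nat) : Int) + (v.length : Int)
        = ((key.length + 2 + v.length : Nat) : Int) from by push_cast; ring]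
    rw [PySem.List.slice_natCast]
    rw [hdrop2, show key.length + 2 + v.length - (key.length + 2) = v.length from by omega,
      List.take_left]
  · rw [if_neg hp]
    have hsplit : ('&' :: (kv ++ '&' :: rest)) = ('&' :: kv) ++ ('&' :: rest) := by simp
    have hnfree : '&' ∉ key ++ ['='] := by
      intro h
      rcases List.mem_append.mp h with h | h
      · exact hka h
      · simp at h
    have hnomatch : ∀ i, i < ('&' :: kv).length →
        ¬ ('&' :: (key ++ ['='])) <+: (('&' :: kv) ++ ('&' :: rest)).drop i := by
      intro i hi hpre
      cases i with
      | zero =>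
        simp only [List.drop_zero, List.cons_append] at hpre
        have := (List.cons_prefix_cons.mp hpre).2
        exact hp (pv_prefix_avoid this hnfree)
      | succ j =>
        simp only [List.length_cons] at hi
        rw [List.cons_append, List.drop_succ_cons,
          List.drop_append_of_le_length (by omega)] at hpre
        obtain ⟨c, cs, hcs⟩ : ∃ c cs, kv.drop j = c :: cs := by
          rcases h : kv.drop j with _ | ⟨c, cs⟩
          · exfalso
            have := congrArg List.length h
            simp at this; omega
          · exact ⟨c, cs, rfl⟩
        rw [hcs] at hpre
        have hc : c ∈ kv := List.mem_of_mem_drop (hcs ▸ List.mem_cons_self ..)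
        have := (List.cons_prefix_cons.mp hpre).1
        exact hfree (this ▸ hc)
    show (if PySem.Chars.find ('&' :: (kv ++ '&' :: rest)) ('&' :: (key ++ ['='])) = -1
          then _ else _) = _
    rw [hsplit, pv_find_prefix_free _ _ _ (pv_needle_nonempty key) hnomatch]
    by_cases hF : PySem.Chars.find ('&' :: rest) ('&' :: (key ++ ['='])) = -1
    · rw [if_pos hF, if_pos rfl]
      show _ = (if PySem.Chars.find ('&' :: rest) ('&' :: (key ++ ['='])) = -1 then _ else _)
      rw [if_pos hF]
    · obtain ⟨n, hn⟩ : ∃ n : Nat, PySem.Chars.find ('&' :: rest) ('&' :: (key ++ ['='])) = n := by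
        have h1 := PySem.Chars.neg_one_le_find ('&' :: rest) ('&' :: (key ++ ['=']))
        exact ⟨_, (Int.toNat_of_nonneg (by omega)).symm⟩
      have hspec := (PySem.Chars.find_spec (s := '&' :: rest) (sub := '&' :: (key ++ ['='])) (by omega)).1
      rw [hn, Int.toNat_natCast] at hspec
      have hlen2 : n + (key.length + 2) ≤ rest.length + 1 := by
        have h2 := hspec.length_le
        simp only [List.length_drop, List.length_cons, List.length_append] at h2
        omega
      rw [if_neg hF, hn]
      rw [if_neg (by omega)]
      rw [show (('&' :: kv).length : Int) + (n : Int) + (('&' :: (key ++ ['='])).length : Int)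
          = ((kv.length + 1 + n + (key.length + 2) : Nat) : Int) from by push_cast; simp; ring]
      show _ = (if PySem.Chars.find ('&' :: rest) ('&' :: (key ++ ['='])) = -1 then _ else _)
      rw [if_neg hF, hn]
      rw [show (n : Int) + (('&' :: (key ++ ['='])).length : Int)
          = ((n + (key.length + 2) : Nat) : Int) from by push_cast; simp; ring]
      have hhaylen : (('&' :: kv) ++ ('&' :: rest)).length = kv.length + 1 + (rest.length + 1) := by
        simp; ring
      have hdropEq : List.drop (kv.length + 1 + n + (key.length + 2)) (('&' :: kv) ++ ('&' :: rest))
          = List.drop (n + (key.length + 2)) ('&' :: rest) := by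
        rw [List.drop_append, List.drop_eq_nil_of_le (by simp; omega), List.nil_append,
          show kv.length + 1 + n + (key.length + 2) - ('&' :: kv).length = n + (key.length + 2)
            from by simp; omega]
      rw [PySem.Chars.findFrom_natCast _ _ _ (by rw [hhaylen]; omega),
        PySem.Chars.findFrom_natCast _ _ _ (by simp; omega)]
      rw [hdropEq]
      by_cases hG : PySem.Chars.find (List.drop (n + (key.length + 2)) ('&' :: rest)) ['&'] = -1
      · rw [if_pos hG, if_pos hG, if_pos rfl, if_pos rfl]
        rw [PySem.List.slice_from _ (by positivity), PySem.List.slice_from _ (by positivity)]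
        rw [Int.toNat_natCast, Int.toNat_natCast, hdropEq]
      · obtain ⟨g, hg⟩ : ∃ g : Nat, PySem.Chars.find (List.drop (n + (key.length + 2)) ('&' :: rest)) ['&'] = g := by
          have h1 := PySem.Chars.neg_one_le_find (List.drop (n + (key.length + 2)) ('&' :: rest)) ['&']
          exact ⟨_, (Int.toNat_of_nonneg (by omega)).symm⟩
        rw [if_neg hG, if_neg hG, hg]
        rw [if_neg (by push_cast; omega), if_neg (by push_cast; omega)]
        rw [show ((kv.length + 1 + n + (key.length + 2) : Nat) : Int) + (g : Int)
            = ((kv.length + 1 + n + (key.length + 2) + g : Nat) : Int) from by push_cast; ring]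
        rw [show ((n + (key.length + 2) : Nat) : Int) + (g : Int)
            = ((n + (key.length + 2) + g : Nat) : Int) from by push_cast; ring]
        rw [PySem.List.slice_natCast, PySem.List.slice_natCast]
        rw [hdropEq,
          show kv.length + 1 + n + (key.length + 2) + g - (kv.length + 1 + n + (key.length + 2)) = g
            from by omega,
          show n + (key.length + 2) + g - (n + (key.length + 2)) = g from by omega]

theorem pv_pieces_free (s : List Char) : ∀ p ∈ PySem.Chars.splitOn s ['&'], '&' ∉ p := by
  have H : ∀ n (s : List Char), s.length ≤ n → ∀ p ∈ PySem.Chars.splitOn s ['&'], '&' ∉ p := by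
    intro n
    induction n with
    | zero =>
      intro s hs
      have : s = [] := List.length_eq_zero_iff.mp (by omega)
      subst this
      rw [pv_splitOn_free [] (by simp)]
      intro p hp
      simp at hp
      simp [hp]
    | succ n ih =>
      intro s hs
      by_cases hm : '&' ∈ s
      · obtain ⟨kv, rest, rfl, hk⟩ := pv_split_first hm
        rw [pv_splitOn_cons kv rest hk]
        intro p hp
        rcases List.mem_cons.mp hp with rfl | hp
        · exact hk
        · exact ih rest (by simp at hs; omega) p hp
      · rw [pv_splitOn_free s hm]
        intro p hp
        rcases List.mem_cons.mp hp with rfl | hp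
        · exact hm
        · simp at hp
  exact H s.length s (le_refl _)

-- a key containing '&' or '=' never matches any pair A scans
theorem pv_badkey (key : List Char) (hbad : '&' ∈ key ∨ '=' ∈ key) :
    ∀ l : List (List Char), (∀ p ∈ l, '&' ∉ p) → pvCharGoA key l = [] := by
  intro l
  induction l with
  | nil => intro _; rfl
  | cons kv rest ih =>
    intro hl
    have hkvfree : '&' ∉ kv := hl kv (List.mem_cons_self ..)
    rw [show pvCharGoA key (kv :: rest)
        = (if PySem.Chars.isIn ['='] kv then
            (if (PySem.Chars.splitOnMax kv ['='] 1).getD 0 [] = key then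
              (PySem.Chars.splitOnMax kv ['='] 1).getD 1 []
            else pvCharGoA key rest)
          else pvCharGoA key rest) from rfl]
    by_cases hm : '=' ∈ kv
    · obtain ⟨k, v, rfl, hk⟩ := pv_split_first hm
      rw [if_pos ((pv_isIn_mem _ _).mpr hm), pv_splitOnMax_break k v hk]
      rw [if_neg, ]
      · exact ih (fun p hp => hl p (List.mem_cons_of_mem _ hp))
      · simp only [List.getD_cons_zero]
        rintro rfl
        rcases hbad with h | h
        · exact hkvfree (List.mem_append_left _ h)
        · exact hk h
    · rw [if_neg (by rw [pv_isIn_mem]; exact hm)]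
      exact ih (fun p hp => hl p (List.mem_cons_of_mem _ hp))

-- main char-level equivalence for a clean key
theorem pv_main (key : List Char) (hke : '=' ∉ key) (hka : '&' ∉ key) (qs : List Char) :
    pvCharGoA key (PySem.Chars.splitOn qs ['&']) = pvCoreB qs key := by
  have H : ∀ n (qs : List Char), qs.length ≤ n →
      pvCharGoA key (PySem.Chars.splitOn qs ['&']) = pvCoreB qs key := by
    intro n
    induction n with
    | zero =>
      intro qs hq
      have : qs = [] := List.length_eq_zero_iff.mp (by omega)
      subst this
      rw [pv_splitOn_free [] (by simp), pv_stepA key [] [] hke,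
        pv_coreB_last key [] (by simp)]
      rfl
    | succ n ih =>
      intro qs hq
      by_cases hm : '&' ∈ qs
      · obtain ⟨kv, rest, rfl, hk⟩ := pv_split_first hm
        rw [pv_splitOn_cons kv rest hk, pv_stepA key kv _ hke,
          pv_coreB_step key kv rest hk hka, ih rest (by simp at hq; omega)]
      · rw [pv_splitOn_free qs hm, pv_stepA key qs [] hke, pv_coreB_last key qs hm]
        rfl
  exact H qs.length qs (le_refl _)

theorem pv_getD_toList (parts : List String) (i : Nat) :
    (parts.getD i "").toList = (parts.map String.toList).getD i [] := by
  simp only [List.getD, List.getElem?_map]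
  cases parts[i]? <;> rfl

theorem pv_splitMax_eq_parts (kv : String) :
    ∃ parts : List String, PySem.Str.splitMax? kv "=" 1 = some parts ∧
      parts.map String.toList = PySem.Chars.splitOnMax kv.toList ['='] 1 := by
  have h := PySem.Str.splitMax?_map kv "=" 1
  rcases hp : PySem.Str.splitMax? kv "=" 1 with _ | parts
  · rw [hp] at h
    simp [PySem.Chars.splitMax?] at h
  · refine ⟨parts, rfl, ?_⟩
    rw [hp] at h
    rw [show "=".toList = ['='] from rfl] at h
    simp only [Option.map_some] at h
    have : PySem.Chars.splitMax? kv.toList ['='] 1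
        = some (PySem.Chars.splitOnMax kv.toList ['='] 1) := by
      simp [PySem.Chars.splitMax?]
    rw [this] at h
    exact Option.some_injective _ h

theorem pv_goA_toList (key : String) (pieces : List String) :
    (pvGoA key pieces).toList = pvCharGoA key.toList (pieces.map String.toList) := by
  induction pieces with
  | nil => rfl
  | cons kv rest ih =>
    obtain ⟨parts, hp, hmap⟩ := pv_splitMax_eq_parts kv
    simp only [List.map_cons]
    rw [show pvGoA key (kv :: rest)
        = (if PySem.Str.isIn "=" kv then
            (if ((PySem.Str.splitMax? kv "=" 1).getD []).getD 0 "" = key then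
              ((PySem.Str.splitMax? kv "=" 1).getD []).getD 1 ""
            else pvGoA key rest)
          else pvGoA key rest) from rfl]
    rw [show pvCharGoA key.toList (kv.toList :: rest.map String.toList)
        = (if PySem.Chars.isIn ['='] kv.toList then
            (if (PySem.Chars.splitOnMax kv.toList ['='] 1).getD 0 [] = key.toList then
              (PySem.Chars.splitOnMax kv.toList ['='] 1).getD 1 []
            else pvCharGoA key.toList (rest.map String.toList))
          else pvCharGoA key.toList (rest.map String.toList)) from rfl]
    rw [show PySem.Str.isIn "=" kv = PySem.Chars.isIn ['='] kv.toList from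
      PySem.Str.isIn_eq "=" kv]
    by_cases hin : PySem.Chars.isIn ['='] kv.toList = true
    · rw [if_pos hin, if_pos hin, hp]
      simp only [Option.getD_some]
      have hkeq : (parts.getD 0 "" = key) ↔
          ((PySem.Chars.splitOnMax kv.toList ['='] 1).getD 0 [] = key.toList) := by
        rw [← String.toList_inj, pv_getD_toList, hmap]
      by_cases hk : parts.getD 0 "" = key
      · rw [if_pos hk, if_pos (hkeq.mp hk), pv_getD_toList, hmap]
      · rw [if_neg hk, if_neg (fun h => hk (hkeq.mpr h))]
        exact ih
    · rw [if_neg hin, if_neg hin]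
      exact ih

theorem pv_split_eq_pieces (qs : String) :
    ∃ pieces : List String, PySem.Str.split? qs "&" = some pieces ∧
      pieces.map String.toList = PySem.Chars.splitOn qs.toList ['&'] := by
  have h := PySem.Str.split?_map qs "&"
  rcases hp : PySem.Str.split? qs "&" with _ | pieces
  · rw [hp] at h
    simp [PySem.Chars.split?] at h
  · refine ⟨pieces, rfl, ?_⟩
    rw [hp] at h
    rw [show "&".toList = ['&'] from rfl] at h
    simp only [Option.map_some] at h
    have : PySem.Chars.split? qs.toList ['&'] = some (PySem.Chars.splitOn qs.toList ['&']) := by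
      simp [PySem.Chars.split?]
    rw [this] at h
    exact Option.some_injective _ h

theorem pv_altCore_toList (qs key : String) :
    (if PySem.Str.find ("&" ++ qs) ("&" ++ key ++ "=") = -1 then ""
     else
       if PySem.Str.findFrom ("&" ++ qs) "&"
            (PySem.Str.find ("&" ++ qs) ("&" ++ key ++ "=") + PySem.Str.len ("&" ++ key ++ "=")) = -1
       then PySem.Str.slice ("&" ++ qs)
            (some (PySem.Str.find ("&" ++ qs) ("&" ++ key ++ "=") + PySem.Str.len ("&" ++ key ++ "="))) none
       else PySem.Str.slice ("&" ++ qs)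
            (some (PySem.Str.find ("&" ++ qs) ("&" ++ key ++ "=") + PySem.Str.len ("&" ++ key ++ "=")))
            (some (PySem.Str.findFrom ("&" ++ qs) "&"
              (PySem.Str.find ("&" ++ qs) ("&" ++ key ++ "=") + PySem.Str.len ("&" ++ key ++ "="))))).toList
    = pvCoreB qs.toList key.toList := by
  have hhay : ("&" ++ qs).toList = '&' :: qs.toList := by
    rw [String.toList_append]; rfl
  have hneedle : ("&" ++ key ++ "=").toList = '&' :: (key.toList ++ ['=']) := by
    rw [String.toList_append, String.toList_append]; rfl
  simp only [pvCoreB, PySem.Str.find_eq, PySem.Str.findFrom_eq, PySem.Str.len_eq,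
    hhay, hneedle, show "&".toList = ['&'] from rfl]
  split_ifs with h1 h2
  · rfl
  · rw [PySem.Str.toList_slice, PySem.Chars.slice_eq_listSlice, hhay]
  · rw [PySem.Str.toList_slice, PySem.Chars.slice_eq_listSlice, hhay]

theorem pv_final (path key : String) : get_query_value path key = get_query_value_alt path key := by
  rw [← String.toList_inj]
  unfold get_query_value get_query_value_alt
  by_cases hq : PySem.Str.isIn "?" path = true
  · simp only [hq, if_true]
    obtain ⟨pieces, hp, hmap⟩ :=
      pv_split_eq_pieces (((PySem.Str.splitMax? path "?" 1).getD []).getD 1 "")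
    by_cases hbad : (PySem.Str.isIn "&" key || PySem.Str.isIn "=" key) = true
    · simp only [hbad, if_true]
      rw [hp]
      simp only [Option.getD_some]
      rw [pv_goA_toList, hmap]
      rw [pv_badkey key.toList ?_ _ (pv_pieces_free _)]
      · rfl
      · rcases Bool.or_eq_true_iff.mp hbad with h | h
        · left
          rw [PySem.Str.isIn_eq, show "&".toList = ['&'] from rfl] at h
          exact (pv_isIn_mem _ _).mp h
        · right
          rw [PySem.Str.isIn_eq, show "=".toList = ['='] from rfl] at h
          exact (pv_isIn_mem _ _).mp h
    · simp only [hbad, Bool.false_eq_true, if_false]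
      rw [hp]
      simp only [Option.getD_some]
      rw [pv_goA_toList, hmap]
      have hka : '&' ∉ key.toList := by
        intro h
        apply hbad
        rw [Bool.or_eq_true_iff]
        left
        rw [PySem.Str.isIn_eq, show "&".toList = ['&'] from rfl]
        exact (pv_isIn_mem _ _).mpr h
      have hke : '=' ∉ key.toList := by
        intro h
        apply hbad
        rw [Bool.or_eq_true_iff]
        right
        rw [PySem.Str.isIn_eq, show "=".toList = ['='] from rfl]
        exact (pv_isIn_mem _ _).mpr h
      rw [pv_main key.toList hke hka]
      exact (pv_altCore_toList _ key).symm
  · rw [if_neg hq, if_neg hq]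

-- ===== VERDICT (by name: the statement is the Claim_ definition above) =====
theorem get_query_value_spec : Claim_equal_get_query_value := by
  intro path key _
  exact pv_final path key
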